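-- pv_equiv track=rewrite | github.com/v-dvorak/ntk-viz | interpolation.py | _find_zero_sublists_indexes
-- ===== SOURCE A (Python) =====
-- def _find_zero_sublists_indexes(numbers):
--     zero_sublists_indexes = []
--     start_index = None
--
--     for i, num in enumerate(numbers):
--         if num == 0:
--             if start_index is None:
--                 start_index = i
--         else:
--             if start_index is not None:
--                 zero_sublists_indexes.append((start_index, i - 1))
--                 start_index = None
--
--     # Handle case where the list ends with zeros
--     if start_index is not None:
--         zero_sublists_indexes.append((start_index, len(numbers) - 1))
--
--     return zero_sublists_indexes
-- ===== SOURCE B (Python) =====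
-- def _find_zero_sublists_indexes(numbers):
--     # Two-pointer run scan: locate each zero run and emit its endpoints directly.
--     result = []
--     n = len(numbers)
--     i = 0
--     while i < n:
--         if numbers[i] == 0:
--             j = i
--             while j + 1 < n and numbers[j + 1] == 0:
--                 j += 1
--             result.append((i, j))
--             i = j + 1
--         else:
--             i += 1
--     return result
-- ===== Notes on version B (the rewrite author's own statement) =====
-- stated objective: alternative
-- what changed: Replaced the single state-machine pass with a start_index sentinel by a two-pointer run scan that finds each zero run and emits (start, end) directly, with no carried Optional state and no end-of-list fixup.
import Mathlib
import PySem

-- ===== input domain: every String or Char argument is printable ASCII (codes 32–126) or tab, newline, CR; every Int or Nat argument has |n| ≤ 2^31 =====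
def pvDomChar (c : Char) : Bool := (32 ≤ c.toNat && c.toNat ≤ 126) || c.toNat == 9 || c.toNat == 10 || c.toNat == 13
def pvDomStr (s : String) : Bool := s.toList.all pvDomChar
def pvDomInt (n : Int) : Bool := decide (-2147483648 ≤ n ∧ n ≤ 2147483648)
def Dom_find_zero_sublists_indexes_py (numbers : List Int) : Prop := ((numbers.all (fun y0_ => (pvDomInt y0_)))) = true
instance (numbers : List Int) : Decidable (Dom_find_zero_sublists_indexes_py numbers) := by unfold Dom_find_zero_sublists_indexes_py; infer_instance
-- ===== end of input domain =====

-- B is an alternative of the same cost: a two-pointer run scan replacing A's sentinel state machine.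

-- ===== PORT A =====
-- A's for loop over enumerate(numbers), carrying (accumulator, start_index) as state.
def pvALoop : List Int → Int → List (Int × Int) → Option Int → List (Int × Int) × Option Int
  | [], _, acc, st => (acc, st)
  | num :: rest, i, acc, st =>
    if num = 0 then
      match st with
      | none => pvALoop rest (i + 1) acc (some i)
      | some _ => pvALoop rest (i + 1) acc st
    else
      match st with
      | some s => pvALoop rest (i + 1) (acc ++ [(s, i - 1)]) none
      | none => pvALoop rest (i + 1) acc none

def find_zero_sublists_indexes_py (numbers : List Int) : List (Int × Int) :=
  match pvALoop numbers 0 [] none with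
  | (acc, some s) => acc ++ [(s, (numbers.length : Int) - 1)]
  | (acc, none) => acc

-- ===== PORT B =====
-- length of the zero prefix of l (B's inner `while` extending j over zeros)
def pvZeroRun : List Int → Nat
  | [] => 0
  | x :: xs => if x = 0 then 1 + pvZeroRun xs else 0

-- B's outer scan: at a zero, measure the run, emit its endpoints, jump past it.
def pvBScan : List Int → Int → List (Int × Int)
  | [], _ => []
  | x :: xs, i =>
    if x = 0 then
      let k := pvZeroRun xs
      (i, i + (k : Int)) :: pvBScan (xs.drop k) (i + (k : Int) + 1)
    else
      pvBScan xs (i + 1)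
termination_by l _ => l.length
decreasing_by
  · simp [List.length_drop]
  · simp

def find_zero_sublists_indexes_py_alt (numbers : List Int) : List (Int × Int) :=
  pvBScan numbers 0

-- ===== PRECONDITION & SPEC =====
def Spec_find_zero_sublists_indexes_py (numbers : List Int) (out : List (Int × Int)) : Prop := out = find_zero_sublists_indexes_py_alt numbers
instance (numbers : List Int) (out : List (Int × Int)) : Decidable (Spec_find_zero_sublists_indexes_py numbers out) := by unfold Spec_find_zero_sublists_indexes_py; infer_instance

-- ===== CLAIM (what is proved, stated in full; the proofs are below) =====
def Claim_equal_find_zero_sublists_indexes_py : Prop := ∀ (numbers : List Int), Dom_find_zero_sublists_indexes_py numbers → Spec_find_zero_sublists_indexes_py numbers (find_zero_sublists_indexes_py numbers)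

-- ===== LEMMAS AND PROOFS =====

-- finalize A's loop result the way find_zero_sublists_indexes_py does, with the
-- trailing index expressed from the current position and remaining length.
def pvAFin (l : List Int) (i : Int) (acc : List (Int × Int)) (st : Option Int) : List (Int × Int) :=
  match pvALoop l i acc st with
  | (a, some s) => a ++ [(s, i + (l.length : Int) - 1)]
  | (a, none) => a

-- What the B-side computes from a mid-run state.
def pvBCont (l : List Int) (i : Int) (st : Option Int) : List (Int × Int) :=
  match st with
  | none => pvBScan l i
  | some s =>
      (s, i + (pvZeroRun l : Int) - 1) :: pvBScan (l.drop (pvZeroRun l)) (i + (pvZeroRun l : Int))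

theorem pvLoop_eq (l : List Int) : ∀ (i : Int) (acc : List (Int × Int)) (st : Option Int),
    pvAFin l i acc st = acc ++ pvBCont l i st := by
  induction l with
  | nil =>
    intro i acc st
    cases st with
    | none => simp [pvAFin, pvALoop, pvBCont, pvBScan]
    | some s => simp [pvAFin, pvALoop, pvBCont, pvBScan, pvZeroRun]
  | cons x xs ih =>
    intro i acc st
    by_cases hx : x = 0
    · cases st with
      | none =>
        have h1 : pvAFin (x :: xs) i acc none = pvAFin xs (i + 1) acc (some i) := by
          simp [pvAFin, pvALoop, hx]; ring_nf
        rw [h1, ih]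
        simp [pvBCont, pvBScan, hx]
        refine ⟨by ring, ?_⟩
        congr 1
        ring
      | some s =>
        have h1 : pvAFin (x :: xs) i acc (some s) = pvAFin xs (i + 1) acc (some s) := by
          simp [pvAFin, pvALoop, hx]; ring_nf
        rw [h1, ih]
        simp [pvBCont, pvZeroRun, hx]
        refine ⟨by ring, ?_⟩
        rw [Nat.add_comm, List.drop_succ_cons]
        congr 1
        ring
    · cases st with
      | none =>
        have h1 : pvAFin (x :: xs) i acc none = pvAFin xs (i + 1) acc none := by
          simp [pvAFin, pvALoop, hx]; ring_nf
        rw [h1, ih]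
        simp [pvBCont, pvBScan, hx]
      | some s =>
        have h1 : pvAFin (x :: xs) i acc (some s) = pvAFin xs (i + 1) (acc ++ [(s, i - 1)]) none := by
          simp [pvAFin, pvALoop, hx]; ring_nf
        rw [h1, ih]
        simp [pvBCont, pvZeroRun, hx, pvBScan]

-- ===== VERDICT (by name: the statement is the Claim_ definition above) =====
theorem find_zero_sublists_indexes_py_spec : Claim_equal_find_zero_sublists_indexes_py := by
  intro numbers _
  show find_zero_sublists_indexes_py numbers = find_zero_sublists_indexes_py_alt numbers
  have h := pvLoop_eq numbers 0 [] none
  simpa [pvAFin, pvBCont, find_zero_sublists_indexes_py, find_zero_sublists_indexes_py_alt] using h
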